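-- pv_equiv track=rewrite | github.com/courtneyhussein/scrabble-scorer-python-asgn | scrabble_scorer.py | old_scrabble_scorer
-- ===== SOURCE A (Python) =====
-- OLD_POINT_STRUCTURE = {
--   0: [' '],
--   1: ['A', 'E', 'I', 'O', 'U', 'L', 'N', 'R', 'S', 'T'],
--   2: ['D', 'G'],
--   3: ['B', 'C', 'M', 'P'],
--   4: ['F', 'H', 'V', 'W', 'Y'],
--   5: ['K'],
--   8: ['J', 'X'],
--   10: ['Q', 'Z']
-- }
--
-- def old_scrabble_scorer(word):
--     word = word.upper()
--     letterPoints = ""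
--
--     for char in word:
--
--         for point_value in OLD_POINT_STRUCTURE:
--
--             if char in OLD_POINT_STRUCTURE[point_value]:
--                 letterPoints += 'Points for {char}: {point_value}\n'.format(char = char, point_value = point_value)
--
--     return letterPoints
-- ===== SOURCE B (Python) =====
-- OLD_POINT_STRUCTURE = {
--   0: [' '],
--   1: ['A', 'E', 'I', 'O', 'U', 'L', 'N', 'R', 'S', 'T'],
--   2: ['D', 'G'],
--   3: ['B', 'C', 'M', 'P'],
--   4: ['F', 'H', 'V', 'W', 'Y'],
--   5: ['K'],
--   8: ['J', 'X'],
--   10: ['Q', 'Z']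
-- }
--
-- _LETTER_VALUE = {letter: points
--                  for points, letters in OLD_POINT_STRUCTURE.items()
--                  for letter in letters}
--
-- def old_scrabble_scorer(word):
--     parts = []
--     for char in word.upper():
--         points = _LETTER_VALUE.get(char)
--         if points is not None:
--             parts.append('Points for {}: {}\n'.format(char, points))
--     return ''.join(parts)
-- ===== Notes on version B (the rewrite author's own statement) =====
-- stated objective: simpler
-- what changed: Inverts the point table once into a letter->points dictionary, then makes a single pass over the uppercased word with a direct lookup and joins the collected lines, removing the inner scan over the whole table for every character.
import Mathlib
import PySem

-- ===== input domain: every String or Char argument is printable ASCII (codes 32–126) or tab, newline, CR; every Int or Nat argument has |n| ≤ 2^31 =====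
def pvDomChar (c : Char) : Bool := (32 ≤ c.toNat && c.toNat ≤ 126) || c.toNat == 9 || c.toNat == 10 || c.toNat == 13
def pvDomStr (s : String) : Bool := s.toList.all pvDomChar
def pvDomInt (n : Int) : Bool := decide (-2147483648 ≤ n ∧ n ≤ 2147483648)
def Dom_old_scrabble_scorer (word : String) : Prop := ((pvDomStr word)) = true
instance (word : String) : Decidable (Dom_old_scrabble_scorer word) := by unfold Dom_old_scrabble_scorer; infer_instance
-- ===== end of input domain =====

-- B inverts the point table once into a letter→points dictionary and makes a single
-- pass over the uppercased word with a direct lookup (objective: simpler, the inner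
-- table scan disappears).


-- ===== PORT A =====
-- OLD_POINT_STRUCTURE: dict int -> list of one-char strings, iterated in insertion
-- order; values are ported as List Char (each Python entry is a single character).
def oldPointStructure : List (Int × List Char) :=
  [(0, [' ']),
   (1, ['A', 'E', 'I', 'O', 'U', 'L', 'N', 'R', 'S', 'T']),
   (2, ['D', 'G']),
   (3, ['B', 'C', 'M', 'P']),
   (4, ['F', 'H', 'V', 'W', 'Y']),
   (5, ['K']),
   (8, ['J', 'X']),
   (10, ['Q', 'Z'])]

def old_scrabble_scorer (word : String) : String :=
  (PySem.Str.upper word).toList.foldl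
    (fun letterPoints ch =>
      oldPointStructure.foldl
        (fun lp kv =>
          if ch ∈ kv.2 then
            lp ++ ("Points for " ++ String.singleton ch ++ ": " ++ PySem.Int.toStr kv.1 ++ "\n")
          else lp)
        letterPoints)
    ""

-- ===== PORT B =====
-- _LETTER_VALUE: the dict comprehension inverting OLD_POINT_STRUCTURE.
def letterValue : PySem.Dict Char Int :=
  PySem.Dict.ofList (oldPointStructure.flatMap (fun kv => kv.2.map (fun l => (l, kv.1))))

def old_scrabble_scorer_alt (word : String) : String :=
  PySem.Str.join ""
    ((PySem.Str.upper word).toList.foldl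
      (fun parts ch =>
        match letterValue.get? ch with
        | some p => parts ++ ["Points for " ++ String.singleton ch ++ ": " ++ PySem.Int.toStr p ++ "\n"]
        | none => parts)
      [])

-- ===== PRECONDITION & SPEC =====
def Spec_old_scrabble_scorer (word : String) (out : String) : Prop := out = old_scrabble_scorer_alt word
instance (word : String) (out : String) : Decidable (Spec_old_scrabble_scorer word out) := by unfold Spec_old_scrabble_scorer; infer_instance

-- ===== CLAIM (what is proved, stated in full; the proofs are below) =====
def Claim_equal_old_scrabble_scorer : Prop := ∀ (word : String), Dom_old_scrabble_scorer word → Spec_old_scrabble_scorer word (old_scrabble_scorer word)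

-- ===== LEMMAS AND PROOFS =====

def lineFor (ch : Char) (p : Int) : String :=
  "Points for " ++ String.singleton ch ++ ": " ++ PySem.Int.toStr p ++ "\n"

def lineA (ch : Char) : String :=
  oldPointStructure.foldl (fun lp kv => if ch ∈ kv.2 then lp ++ lineFor ch kv.1 else lp) ""

def allLetters : List Char :=
  [' ', 'A', 'E', 'I', 'O', 'U', 'L', 'N', 'R', 'S', 'T', 'D', 'G', 'B', 'C', 'M', 'P',
   'F', 'H', 'V', 'W', 'Y', 'K', 'J', 'X', 'Q', 'Z']

lemma str_ext {s t : String} (h : s.toList = t.toList) : s = t := by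
  simpa using congrArg String.ofList h

lemma chars_join_append (ps : List (List Char)) (x : List Char) :
    PySem.Chars.join [] (ps ++ [x]) = PySem.Chars.join [] ps ++ x := by
  induction ps with
  | nil => simp [PySem.Chars.join_singleton, PySem.Chars.join_nil]
  | cons a t ih =>
    cases t with
    | nil => simp [PySem.Chars.join_cons_cons, PySem.Chars.join_singleton]
    | cons b t2 =>
      simp only [List.cons_append, PySem.Chars.join_cons_cons] at *
      simp [ih, List.append_assoc]

lemma join_empty_append (ps : List String) (x : String) :
    PySem.Str.join "" (ps ++ [x]) = PySem.Str.join "" ps ++ x := by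
  apply str_ext
  simp only [PySem.Str.toList_join, String.toList_append, List.map_append, List.map_cons,
    List.map_nil]
  have he : ("" : String).toList = [] := rfl
  rw [he]
  exact chars_join_append _ _

lemma innerA_acc (ch : Char) (l : List (Int × List Char)) (acc : String) :
    l.foldl (fun lp kv => if ch ∈ kv.2 then lp ++ lineFor ch kv.1 else lp) acc
      = acc ++ l.foldl (fun lp kv => if ch ∈ kv.2 then lp ++ lineFor ch kv.1 else lp) "" := by
  induction l generalizing acc with
  | nil => simp
  | cons kv t ih =>
    simp only [List.foldl_cons]
    by_cases h : ch ∈ kv.2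
    · rw [if_pos h, if_pos h, ih (acc ++ lineFor ch kv.1), ih ("" ++ lineFor ch kv.1)]
      simp [String.append_assoc]
    · rw [if_neg h, if_neg h, ih]

set_option maxRecDepth 4096 in
lemma per_char (ch : Char) :
    lineA ch = match letterValue.get? ch with
               | some p => lineFor ch p
               | none => "" := by
  by_cases hm : ch ∈ allLetters
  · fin_cases hm <;> decide
  · have hd : letterValue = PySem.Dict.mk [(' ', 0), ('A', 1), ('E', 1), ('I', 1), ('O', 1), ('U', 1), ('L', 1), ('N', 1), ('R', 1), ('S', 1), ('T', 1), ('D', 2), ('G', 2), ('B', 3), ('C', 3), ('M', 3), ('P', 3), ('F', 4), ('H', 4), ('V', 4), ('W', 4), ('Y', 4), ('K', 5), ('J', 8), ('X', 8), ('Q', 10), ('Z', 10)] := by decide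
    have hf : List.find? (fun p => p.1 == ch) [(' ', (0 : Int)), ('A', 1), ('E', 1), ('I', 1), ('O', 1), ('U', 1), ('L', 1), ('N', 1), ('R', 1), ('S', 1), ('T', 1), ('D', 2), ('G', 2), ('B', 3), ('C', 3), ('M', 3), ('P', 3), ('F', 4), ('H', 4), ('V', 4), ('W', 4), ('Y', 4), ('K', 5), ('J', 8), ('X', 8), ('Q', 10), ('Z', 10)] = none := by
      rw [List.find?_eq_none]
      intro x hx hpx
      apply hm
      have hx1 : x.1 = ch := by simpa using hpx
      rw [← hx1]
      fin_cases hx <;> decide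
    have hget : letterValue.get? ch = none := by
      rw [hd]
      show (List.find? (fun p => p.1 == ch) [(' ', (0 : Int)), ('A', 1), ('E', 1), ('I', 1), ('O', 1), ('U', 1), ('L', 1), ('N', 1), ('R', 1), ('S', 1), ('T', 1), ('D', 2), ('G', 2), ('B', 3), ('C', 3), ('M', 3), ('P', 3), ('F', 4), ('H', 4), ('V', 4), ('W', 4), ('Y', 4), ('K', 5), ('J', 8), ('X', 8), ('Q', 10), ('Z', 10)]).map (fun x => x.2) = none
      rw [hf]
      rfl
    have hline : lineA ch = "" := by
      simp only [allLetters, List.mem_cons, List.not_mem_nil, or_false, not_or] at hm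
      obtain ⟨h1, h2, h3, h4, h5, h6, h7, h8, h9, h10, h11, h12, h13, h14, h15, h16, h17, h18, h19, h20, h21, h22, h23, h24, h25, h26, h27⟩ := hm
      simp [lineA, oldPointStructure, lineFor, h1, h2, h3, h4, h5, h6, h7, h8, h9, h10, h11, h12, h13, h14, h15, h16, h17, h18, h19, h20, h21, h22, h23, h24, h25, h26, h27]
    rw [hget, hline]

lemma main_loop (cs : List Char) (s : String) (ps : List String)
    (h : s = PySem.Str.join "" ps) :
    cs.foldl
      (fun letterPoints ch =>
        oldPointStructure.foldl
          (fun lp kv => if ch ∈ kv.2 then lp ++ lineFor ch kv.1 else lp)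
          letterPoints) s
      = PySem.Str.join ""
          (cs.foldl
            (fun parts ch =>
              match letterValue.get? ch with
              | some p => parts ++ [lineFor ch p]
              | none => parts) ps) := by
  induction cs generalizing s ps with
  | nil => simpa using h
  | cons ch t ih =>
    simp only [List.foldl_cons]
    apply ih
    rw [innerA_acc]
    show s ++ lineA ch = _
    rw [per_char ch, h]
    cases hcase : letterValue.get? ch with
    | some p => exact (join_empty_append ps (lineFor ch p)).symm
    | none => simp

-- ===== VERDICT (by name: the statement is the Claim_ definition above) =====
theorem old_scrabble_scorer_spec : Claim_equal_old_scrabble_scorer := by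
  intro word _
  show old_scrabble_scorer word = old_scrabble_scorer_alt word
  exact main_loop (PySem.Str.upper word).toList "" [] rfl
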